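-- pv_equiv track=rewrite | github.com/dev-hang/Programmers-Algorithm | level2/secret_code_decryption.py | secret_code_decryption
-- ===== SOURCE A (Python) =====
-- from itertools import combinations
--
-- def secret_code_decryption(n, q, ans):
--     answer = 0
--     arr = [i for i in range(1, n + 1)]
--
--     for case in list(combinations(arr, 5)):
--         result = []
--         for nums in q:
--             cnt = 0
--             for i in range(len(nums)):
--                 if nums[i] in case:
--                     cnt += 1
--             result.append(cnt)
--         if result == ans:
--             answer += 1
--
--     return answer
-- ===== SOURCE B (Python) =====
-- def secret_code_decryption(n, q, ans):
--     # recursive pick/skip backtracking with incremental per-query counts and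
--     # pruning when a count exceeds its target
--     def go(rem, k, counts):
--         if any(c > a for c, a in zip(counts, ans)):
--             return 0
--         if k == 5:
--             return 1 if counts == ans else 0
--         if not rem:
--             return 0
--         x, rest = rem[0], rem[1:]
--         picked = go(rest, k + 1, [c + nums.count(x) for c, nums in zip(counts, q)])
--         skipped = go(rest, k, counts)
--         return picked + skipped
--     return go(list(range(1, n + 1)), 0, [0] * len(q))
-- ===== Notes on version B (the rewrite author's own statement) =====
-- stated objective: alternative
-- what changed: A enumerates all C(n,5) combinations and recomputes every per-query overlap vector from scratch; B is a pick/skip backtracking recursion over 1..n that maintains incremental per-query overlap counts and prunes a branch as soon as some count exceeds its target.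
import Mathlib
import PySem

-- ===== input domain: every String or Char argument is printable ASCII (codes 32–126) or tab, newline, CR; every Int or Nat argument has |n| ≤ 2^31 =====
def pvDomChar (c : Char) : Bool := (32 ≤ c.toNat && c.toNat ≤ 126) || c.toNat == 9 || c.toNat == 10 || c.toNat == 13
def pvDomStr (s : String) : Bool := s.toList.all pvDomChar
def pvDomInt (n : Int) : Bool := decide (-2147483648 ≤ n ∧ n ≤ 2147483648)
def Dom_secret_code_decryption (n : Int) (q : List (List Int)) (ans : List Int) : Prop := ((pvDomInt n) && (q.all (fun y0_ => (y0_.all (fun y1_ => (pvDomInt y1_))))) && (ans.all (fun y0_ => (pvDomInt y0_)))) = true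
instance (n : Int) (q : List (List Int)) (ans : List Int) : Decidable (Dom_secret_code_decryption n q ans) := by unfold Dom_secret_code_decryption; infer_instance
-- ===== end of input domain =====

-- B replaces A's full enumeration of all C(n,5) combinations (recomputing every
-- overlap vector from scratch) by a pick/skip backtracking recursion that keeps
-- incremental per-query overlap counts and prunes a branch as soon as some count
-- exceeds its target (objective: alternative).

-- ===== PORT A =====
-- itertools.combinations(arr, 5): standard recursive definition (include head / skip head)
def pvComb : Nat → List Int → List (List Int)
  | 0, _ => [[]]
  | _ + 1, [] => []
  | k + 1, x :: xs => (pvComb k xs).map (fun c => x :: c) ++ pvComb (k + 1) xs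

def secret_code_decryption (n : Int) (q : List (List Int)) (ans : List Int) : Int :=
  let arr := PySem.List.pyRange 1 (n + 1) 1
  (pvComb 5 arr).foldl (fun answer case =>
    let result := q.foldl (fun result nums =>
      let cnt := (PySem.List.pyRange 0 (PySem.List.len nums) 1).foldl
        (fun cnt i => if PySem.List.pyGetD nums i 0 ∈ case then cnt + 1 else cnt) (0 : Int)
      result ++ [cnt]) ([] : List Int)
    if result = ans then answer + 1 else answer) 0

-- ===== PORT B =====
def pvAltGo (q : List (List Int)) (ans : List Int) : List Int → Int → List Int → Int
  | rem, k, counts =>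
    if (counts.zip ans).any (fun p => decide (p.1 > p.2)) then 0
    else if k = 5 then (if counts = ans then 1 else 0)
    else
      match rem with
      | [] => 0
      | x :: rest =>
          pvAltGo q ans rest (k + 1) ((counts.zip q).map (fun p => p.1 + (p.2.count x : Int)))
          + pvAltGo q ans rest k counts

def secret_code_decryption_alt (n : Int) (q : List (List Int)) (ans : List Int) : Int :=
  pvAltGo q ans (PySem.List.pyRange 1 (n + 1) 1) 0 (List.replicate q.length 0)

-- ===== PRECONDITION & SPEC =====
def Spec_secret_code_decryption (n : Int) (q : List (List Int)) (ans : List Int) (out : Int) : Prop := out = secret_code_decryption_alt n q ans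
instance (n : Int) (q : List (List Int)) (ans : List Int) (out : Int) : Decidable (Spec_secret_code_decryption n q ans out) := by unfold Spec_secret_code_decryption; infer_instance

-- ===== CLAIM (what is proved, stated in full; the proofs are below) =====
def Claim_equal_secret_code_decryption : Prop := ∀ (n : Int) (q : List (List Int)) (ans : List Int), Dom_secret_code_decryption n q ans → Spec_secret_code_decryption n q ans (secret_code_decryption n q ans)

-- ===== LEMMAS AND PROOFS =====

-- cumulative overlap vector: counts c plus, per query, the number of positions hit by `case`
def pvF (q : List (List Int)) (c : List Int) (case : List Int) : List Int :=
  (c.zip q).map (fun p => p.1 + (case.map (fun x => (p.2.count x : Int))).sum)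

lemma pvF_nil (q : List (List Int)) (c : List Int) (h : c.length = q.length) :
    pvF q c [] = c := by
  simp only [pvF, List.map_nil, List.sum_nil, add_zero]
  simpa using List.map_fst_zip (l₁ := c) (l₂ := q) (le_of_eq h)

lemma pvF_cons : ∀ (q : List (List Int)) (c : List Int) (x : Int) (case : List Int),
    pvF q ((c.zip q).map (fun p => p.1 + (p.2.count x : Int))) case = pvF q c (x :: case)
  | [], c, x, case => by cases c <;> simp [pvF]
  | nums :: q', [], x, case => by simp [pvF]
  | nums :: q', a :: c', x, case => by
      have ih := pvF_cons q' c' x case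
      simp only [pvF] at ih
      simp only [pvF, List.zip_cons_cons, List.map_cons, List.sum_cons, List.cons.injEq]
      exact ⟨by ring, ih⟩

lemma pvF_sum_nonneg (nums case : List Int) :
    0 ≤ (case.map (fun x => (nums.count x : Int))).sum := by
  apply List.sum_nonneg
  intro y hy
  obtain ⟨x, _, rfl⟩ := List.mem_map.mp hy
  exact Int.natCast_nonneg _

lemma pvF_ne : ∀ (q : List (List Int)) (ans c : List Int), c.length = q.length →
    ((c.zip ans).any (fun p => decide (p.1 > p.2)) = true) → ∀ case, pvF q c case ≠ ans
  | q, ans, [], hl, h, case => by simp at h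
  | q, [], a :: c', hl, h, case => by simp at h
  | [], b :: ans', a :: c', hl, h, case => by simp at hl
  | nums :: q', b :: ans', a :: c', hl, h, case => by
      intro hF
      simp only [List.zip_cons_cons, List.any_cons, Bool.or_eq_true, decide_eq_true_eq] at h
      simp only [pvF, List.zip_cons_cons, List.map_cons, List.cons.injEq] at hF
      obtain ⟨h1, h2⟩ := hF
      rcases h with hgt | h'
      · have hnn := pvF_sum_nonneg nums case
        omega
      · exact pvF_ne q' ans' c' (by simpa using hl) (by simpa using h') case
          (by simpa [pvF] using h2)

lemma pvComb_sublist : ∀ (k : Nat) (l case : List Int), case ∈ pvComb k l → case.Sublist l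
  | 0, l, case, h => by
      simp [pvComb] at h; subst h; exact List.nil_sublist l
  | k + 1, [], case, h => by simp [pvComb] at h
  | k + 1, x :: xs, case, h => by
      simp only [pvComb, List.mem_append, List.mem_map] at h
      rcases h with ⟨c, hc, rfl⟩ | h
      · exact List.Sublist.cons₂ x (pvComb_sublist k xs c hc)
      · exact (pvComb_sublist (k + 1) xs case h).cons x

-- pruned backtracking counts exactly the matching combinations of the remaining numbers
lemma pvAltGo_eq (q : List (List Int)) (ans : List Int) :
    ∀ (rem : List Int) (k : Int) (c : List Int), 0 ≤ k → k ≤ 5 → c.length = q.length →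
    pvAltGo q ans rem k c
      = ((pvComb (5 - k).toNat rem).countP (fun case => decide (pvF q c case = ans)) : Int) := by
  intro rem
  induction rem with
  | nil =>
      intro k c hk0 hk5 hl
      rw [pvAltGo]
      by_cases hpr : (c.zip ans).any (fun p => decide (p.1 > p.2)) = true
      · rw [if_pos hpr]
        have hz : (pvComb (5 - k).toNat []).countP (fun case => decide (pvF q c case = ans)) = 0 := by
          apply List.countP_eq_zero.mpr
          intro case _
          simpa using pvF_ne q ans c hl hpr case
        rw [hz]; rfl
      · rw [if_neg hpr]
        by_cases hk : k = 5
        · subst hk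
          rw [if_pos rfl]
          have : ((5 : Int) - 5).toNat = 0 := by norm_num
          rw [this]
          simp [pvComb, pvF_nil q c hl]
        · rw [if_neg hk]
          have h1 : (5 - k).toNat = (5 - (k + 1)).toNat + 1 := by omega
          rw [h1]
          simp [pvComb]
  | cons x rest ih =>
      intro k c hk0 hk5 hl
      rw [pvAltGo]
      by_cases hpr : (c.zip ans).any (fun p => decide (p.1 > p.2)) = true
      · rw [if_pos hpr]
        have hz : (pvComb (5 - k).toNat (x :: rest)).countP (fun case => decide (pvF q c case = ans)) = 0 := by
          apply List.countP_eq_zero.mpr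
          intro case _
          simpa using pvF_ne q ans c hl hpr case
        rw [hz]; rfl
      · rw [if_neg hpr]
        by_cases hk : k = 5
        · subst hk
          rw [if_pos rfl]
          have h0 : ((5 : Int) - 5).toNat = 0 := by norm_num
          rw [h0]
          simp [pvComb, pvF_nil q c hl]
        · rw [if_neg hk]
          have h1 : (5 - k).toNat = (5 - (k + 1)).toNat + 1 := by omega
          rw [h1]
          simp only [pvComb, List.countP_append, List.countP_map]
          have hc' : ((c.zip q).map (fun p => p.1 + (p.2.count x : Int))).length = q.length := by
            simp [hl]
          have hpick := ih (k + 1) ((c.zip q).map (fun p => p.1 + (p.2.count x : Int)))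
            (by omega) (by omega) hc'
          have hskip := ih k c hk0 hk5 hl
          have hfe : ((fun case => decide (pvF q c case = ans)) ∘ (fun c => x :: c))
              = (fun case => decide (pvF q ((c.zip q).map (fun p => p.1 + (p.2.count x : Int))) case = ans)) := by
            funext case
            simp [Function.comp, pvF_cons]
          rw [h1] at hskip
          rw [hpick, hskip, hfe]
          push_cast
          ring

-- one query's overlap count: sum of multiplicities over a duplicate-free case = positions hit
lemma count_sum_eq_countP (case : List Int) (hnd : case.Nodup) (nums : List Int) :
    (case.map (fun x => (nums.count x : Int))).sum
      = (nums.countP (fun v => decide (v ∈ case)) : Int) := by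
  induction case with
  | nil => simp
  | cons x case ih =>
      have hx : x ∉ case := (List.nodup_cons.mp hnd).1
      have hnd' : case.Nodup := (List.nodup_cons.mp hnd).2
      have hsplit : ∀ nums : List Int, nums.countP (fun v => decide (v ∈ x :: case))
          = nums.count x + nums.countP (fun v => decide (v ∈ case)) := by
        intro nums
        induction nums with
        | nil => simp
        | cons a nums ihn =>
            simp only [List.countP_cons, List.count_cons, List.mem_cons, Bool.decide_or] at ihn ⊢
            by_cases hax : a = x
            · subst hax
              simp [hx, ihn]; omega
            · by_cases hac : a ∈ case <;> simp [hax, hac, ihn] <;> omega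
      rw [List.map_cons, List.sum_cons, ih hnd', hsplit nums]
      push_cast
      ring

lemma zip_replicate_map (f : List Int → Int) :
    ∀ (q : List (List Int)),
      ((List.replicate q.length (0 : Int)).zip q).map (fun p => p.1 + f p.2) = q.map (fun nums => f nums)
  | [] => by simp
  | nums :: q' => by
      simp only [List.length_cons, List.replicate_succ, List.zip_cons_cons, List.map_cons]
      rw [zip_replicate_map f q']
      simp

-- ===== VERDICT (by name: the statement is the Claim_ definition above) =====
theorem secret_code_decryption_spec : Claim_equal_secret_code_decryption := by
  intro n q ans _
  unfold Spec_secret_code_decryption secret_code_decryption secret_code_decryption_alt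
  dsimp only
  -- A side: rewrite the three loops into a countP over the combinations
  have hinner : ∀ (case : List Int) (nums : List Int),
      (PySem.List.pyRange 0 (PySem.List.len nums) 1).foldl
        (fun cnt i => if PySem.List.pyGetD nums i 0 ∈ case then cnt + 1 else cnt) (0 : Int)
      = ((nums.countP (fun v => decide (v ∈ case))) : Int) := by
    intro case nums
    rw [PySem.List.foldl_pyRange_zero_pyGetD nums 0
      (fun (cnt : Int) (v : Int) => if v ∈ case then cnt + 1 else cnt) 0]
    rw [PySem.List.foldl_ite_add_one]
    simp
  have hres : ∀ (case : List Int), q.foldl (fun result nums =>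
      result ++ [(PySem.List.pyRange 0 (PySem.List.len nums) 1).foldl
        (fun cnt i => if PySem.List.pyGetD nums i 0 ∈ case then cnt + 1 else cnt) (0 : Int)]) ([] : List Int)
      = q.map (fun nums => ((nums.countP (fun v => decide (v ∈ case))) : Int)) := by
    intro case
    rw [PySem.List.foldl_append_singleton_eq_map]
    simp only [List.nil_append]
    exact List.map_congr_left (fun nums _ => hinner case nums)
  have hfold : (pvComb 5 (PySem.List.pyRange 1 (n + 1) 1)).foldl (fun (answer : Int) case =>
      if q.foldl (fun result nums =>
        result ++ [(PySem.List.pyRange 0 (PySem.List.len nums) 1).foldl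
          (fun cnt i => if PySem.List.pyGetD nums i 0 ∈ case then cnt + 1 else cnt) (0 : Int)]) ([] : List Int) = ans
      then answer + 1 else answer) 0
      = (pvComb 5 (PySem.List.pyRange 1 (n + 1) 1)).foldl (fun (answer : Int) case =>
        if q.map (fun nums => ((nums.countP (fun v => decide (v ∈ case))) : Int)) = ans
        then answer + 1 else answer) 0 :=
    PySem.List.foldl_congr_mem _ _ _ _ (fun acc case _ => by rw [hres case])
  rw [hfold]
  rw [PySem.List.foldl_ite_add_one]
  -- B side
  rw [pvAltGo_eq q ans (PySem.List.pyRange 1 (n + 1) 1) 0 (List.replicate q.length 0)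
      (by norm_num) (by norm_num) (by simp)]
  have h5 : ((5 : Int) - 0).toNat = 5 := by decide
  rw [h5, zero_add]
  -- the two predicates agree on members of pvComb 5 arr (all duplicate-free)
  congr 1
  apply List.countP_congr
  intro case hc
  have hnd : case.Nodup := (pvComb_sublist 5 (PySem.List.pyRange 1 (n + 1) 1) case hc).nodup
    (PySem.List.nodup_pyRange_one 1 (n + 1))
  have hFz : pvF q (List.replicate q.length 0) case
      = q.map (fun nums => ((nums.countP (fun v => decide (v ∈ case))) : Int)) := by
    unfold pvF
    rw [zip_replicate_map (fun nums => (case.map (fun x => (nums.count x : Int))).sum) q]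
    exact List.map_congr_left (fun nums _ => count_sum_eq_countP case hnd nums)
  rw [hFz]
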